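-- pv_equiv track=rewrite | github.com/albancolley/aoc | aoc2019/7/task.py | get_phases
-- ===== SOURCE A (Python) =====
-- def get_phases(start=0, end=4):
--     phases = []
--     for i1 in range(start, end+1):
--         for i2 in range(start, end+1):
--             if i2 == i1:
--                 continue
--             for i3 in range(start, end+1):
--                 if i3 == i1 or i3 == i2:
--                     continue
--                 for i4 in range(start, end+1):
--                     if i4 == i1 or i4 == i2 or i4 == i3:
--                         continue
--                     for i5 in range(start, end+1):
--                         if i5 == i1 or i5 == i2 or i5 == i3 or i5 == i4:
--                             continue
--                         phases.append(f'{i1}{i2}{i3}{i4}{i5}')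
--     return phases
-- ===== SOURCE B (Python) =====
-- def get_phases(start=0, end=4):
--     def perms(pool, k):
--         if k == 0:
--             return ['']
--         return [str(x) + rest
--                 for x in pool
--                 for rest in perms([y for y in pool if y != x], k - 1)]
--     return perms(list(range(start, end + 1)), 5)
-- ===== Notes on version B (the rewrite author's own statement) =====
-- stated objective: alternative
-- what changed: A scans the full n^5 Cartesian product with five hard-coded nested loops and continue-rejects duplicates; B is a recursive k-permutation generator that picks each next digit from a pool with the already-used values filtered out, building the string back-to-front.
import Mathlib
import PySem

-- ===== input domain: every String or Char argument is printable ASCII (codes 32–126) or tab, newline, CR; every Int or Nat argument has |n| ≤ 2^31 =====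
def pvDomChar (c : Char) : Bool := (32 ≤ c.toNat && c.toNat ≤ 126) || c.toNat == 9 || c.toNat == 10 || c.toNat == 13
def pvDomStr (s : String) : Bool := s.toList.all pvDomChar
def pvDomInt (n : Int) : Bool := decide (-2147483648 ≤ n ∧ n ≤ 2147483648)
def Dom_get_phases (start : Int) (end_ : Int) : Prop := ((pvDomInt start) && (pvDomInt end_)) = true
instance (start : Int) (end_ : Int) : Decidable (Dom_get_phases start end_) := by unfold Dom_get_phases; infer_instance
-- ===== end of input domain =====

-- B replaces A's five nested generate-and-reject loops by a recursive k-permutation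
-- generator over a shrinking pool (objective: alternative; same result, same order).

-- ===== PORT A =====
def get_phases (start : Int) (end_ : Int) : List String :=
  (PySem.List.pyRange start (end_ + 1) 1).foldl (fun phases i1 =>
    (PySem.List.pyRange start (end_ + 1) 1).foldl (fun phases i2 =>
      if i2 = i1 then phases else
      (PySem.List.pyRange start (end_ + 1) 1).foldl (fun phases i3 =>
        if i3 = i1 ∨ i3 = i2 then phases else
        (PySem.List.pyRange start (end_ + 1) 1).foldl (fun phases i4 =>
          if i4 = i1 ∨ i4 = i2 ∨ i4 = i3 then phases else
          (PySem.List.pyRange start (end_ + 1) 1).foldl (fun phases i5 =>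
            if i5 = i1 ∨ i5 = i2 ∨ i5 = i3 ∨ i5 = i4 then phases else
            phases ++ [PySem.Int.toStr i1 ++ PySem.Int.toStr i2 ++ PySem.Int.toStr i3 ++
                       PySem.Int.toStr i4 ++ PySem.Int.toStr i5]) phases) phases) phases) phases) []

-- ===== PORT B =====
-- perms(pool, k) of Source B: all k-permutation strings of pool, in pool order
def pvPerms (pool : List Int) : Nat → List String
  | 0 => [""]
  | Nat.succ k => pool.flatMap (fun x =>
      (pvPerms (pool.filter (fun y => y ≠ x)) k).map (fun rest => PySem.Int.toStr x ++ rest))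

def get_phases_alt (start : Int) (end_ : Int) : List String :=
  pvPerms (PySem.List.pyRange start (end_ + 1) 1) 5

-- ===== PRECONDITION & SPEC =====
def Spec_get_phases (start : Int) (end_ : Int) (out : List String) : Prop := out = get_phases_alt start end_
instance (start : Int) (end_ : Int) (out : List String) : Decidable (Spec_get_phases start end_ out) := by unfold Spec_get_phases; infer_instance

-- ===== CLAIM (what is proved, stated in full; the proofs are below) =====
def Claim_equal_get_phases : Prop := ∀ (start : Int) (end_ : Int), Dom_get_phases start end_ → Spec_get_phases start end_ (get_phases start end_)

-- ===== LEMMAS AND PROOFS =====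
-- A's loop shape: 'if c x then acc else acc ++ g x' appends g over the elements NOT satisfying c
theorem pvFoldlSkip (c : Int → Prop) [DecidablePred c] (g : Int → List String)
    (l : List Int) (acc : List String) :
    l.foldl (fun a x => if c x then a else a ++ g x) acc
      = acc ++ (l.filter (fun x => !decide (c x))).flatMap g := by
  induction l generalizing acc with
  | nil => simp
  | cons x xs ih =>
    by_cases h : c x <;> simp [ih, h]

-- ===== VERDICT (by name: the statement is the Claim_ definition above) =====
theorem get_phases_spec : Claim_equal_get_phases := by
  intro start end_ _
  unfold Spec_get_phases get_phases get_phases_alt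
  generalize PySem.List.pyRange start (end_ + 1) 1 = r
  simp only [pvFoldlSkip, pvPerms, PySem.List.foldl_append_eq_flatMap, List.nil_append]
  simp [List.filter_filter, decide_not, Bool.and_assoc, Bool.and_comm,
        String.append_empty, List.map_flatMap, String.append_assoc]
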